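-- pv_equiv track=rewrite | github.com/csabyy/adventofcode | 2023/11/task.py | count_empty_space
-- ===== SOURCE A (Python) =====
-- def count_empty_space(coord_comp_a, coord_comp_b, point_set, expansion):
--     empty_space = 0
--     i = min(coord_comp_a, coord_comp_b)
--     while i < max(coord_comp_a, coord_comp_b):
--         if i not in point_set:
--             empty_space += expansion - 1
--         i += 1
--     return empty_space
-- ===== SOURCE B (Python) =====
-- def count_empty_space(coord_comp_a, coord_comp_b, point_set, expansion):
--     lo = min(coord_comp_a, coord_comp_b)
--     hi = max(coord_comp_a, coord_comp_b)
--     occupied = len({p for p in point_set if lo <= p < hi})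
--     return (hi - lo - occupied) * (expansion - 1)
-- ===== Notes on version B (the rewrite author's own statement) =====
-- stated objective: alternative
-- what changed: Instead of scanning every integer in [min,max) and testing list membership per position, B makes one pass over point_set to collect the distinct occupied coordinates inside the range and returns (range length - occupied) * (expansion - 1) in closed form.
import Mathlib
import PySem

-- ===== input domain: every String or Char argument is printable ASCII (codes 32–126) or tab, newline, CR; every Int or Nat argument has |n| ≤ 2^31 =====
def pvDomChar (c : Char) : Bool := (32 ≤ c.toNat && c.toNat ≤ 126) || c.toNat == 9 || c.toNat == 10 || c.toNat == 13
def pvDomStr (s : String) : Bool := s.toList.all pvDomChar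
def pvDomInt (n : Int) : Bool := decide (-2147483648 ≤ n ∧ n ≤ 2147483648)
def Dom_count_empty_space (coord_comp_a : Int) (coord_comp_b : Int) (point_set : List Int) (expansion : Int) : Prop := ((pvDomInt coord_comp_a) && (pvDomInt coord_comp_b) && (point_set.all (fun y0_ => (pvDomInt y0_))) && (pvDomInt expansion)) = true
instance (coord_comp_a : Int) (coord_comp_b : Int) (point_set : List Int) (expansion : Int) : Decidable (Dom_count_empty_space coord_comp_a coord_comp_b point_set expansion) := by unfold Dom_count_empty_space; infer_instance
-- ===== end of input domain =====

-- B replaces A's scan of every integer in the range by a single pass over point_set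
-- counting distinct occupied coordinates in range, then a closed-form subtraction (alternative algorithm).

-- ===== PORT A =====
-- the while loop of A: i runs from min up to max, adding expansion-1 whenever i is unoccupied
def ceLoopA (hi : Int) (point_set : List Int) (expansion : Int) (i : Int) (empty_space : Int) : Int :=
  if i < hi then
    ceLoopA hi point_set expansion (i + 1)
      (if i ∈ point_set then empty_space else empty_space + (expansion - 1))
  else empty_space
termination_by (hi - i).toNat
decreasing_by omega

def count_empty_space (coord_comp_a : Int) (coord_comp_b : Int) (point_set : List Int) (expansion : Int) : Int :=
  ceLoopA (max coord_comp_a coord_comp_b) point_set expansion (min coord_comp_a coord_comp_b) 0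

-- ===== PORT B =====
def count_empty_space_alt (coord_comp_a : Int) (coord_comp_b : Int) (point_set : List Int) (expansion : Int) : Int :=
  let lo := min coord_comp_a coord_comp_b
  let hi := max coord_comp_a coord_comp_b
  -- {p for p in point_set if lo <= p < hi}
  let occupied : Int := (PySem.Set.ofList (point_set.filter (fun p => decide (lo ≤ p) && decide (p < hi)))).length
  (hi - lo - occupied) * (expansion - 1)

-- ===== PRECONDITION & SPEC =====
def Spec_count_empty_space (coord_comp_a : Int) (coord_comp_b : Int) (point_set : List Int) (expansion : Int) (out : Int) : Prop := out = count_empty_space_alt coord_comp_a coord_comp_b point_set expansion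
instance (coord_comp_a : Int) (coord_comp_b : Int) (point_set : List Int) (expansion : Int) (out : Int) : Decidable (Spec_count_empty_space coord_comp_a coord_comp_b point_set expansion out) := by unfold Spec_count_empty_space; infer_instance

-- ===== CLAIM (what is proved, stated in full; the proofs are below) =====
def Claim_equal_count_empty_space : Prop := ∀ (coord_comp_a : Int) (coord_comp_b : Int) (point_set : List Int) (expansion : Int), Dom_count_empty_space coord_comp_a coord_comp_b point_set expansion → Spec_count_empty_space coord_comp_a coord_comp_b point_set expansion (count_empty_space coord_comp_a coord_comp_b point_set expansion)

-- ===== LEMMAS AND PROOFS =====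

-- A's loop counts the unoccupied integers of [i, hi) and multiplies by expansion-1
theorem ceLoopA_eq (hi : Int) (ps : List Int) (e : Int) :
    ∀ (n : Nat) (i acc : Int), (hi - i).toNat = n →
      ceLoopA hi ps e i acc =
        acc + (((Finset.Ico i hi).filter (fun x => x ∉ ps)).card : Int) * (e - 1) := by
  intro n
  induction n with
  | zero =>
    intro i acc h
    rw [ceLoopA]
    have hge : hi ≤ i := by omega
    simp [Finset.Ico_eq_empty_of_le hge, if_neg (by omega : ¬ i < hi)]
  | succ n ih =>
    intro i acc h
    rw [ceLoopA]
    have hlt : i < hi := by omega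
    rw [if_pos hlt, ih (i + 1) _ (by omega)]
    have hIco : Finset.Ico i hi = insert i (Finset.Ico (i + 1) hi) := by
      ext x; simp [Finset.mem_Ico, Finset.mem_insert]; omega
    rw [hIco, Finset.filter_insert]
    by_cases hm : i ∈ ps
    · simp [hm]
    · rw [if_neg hm, if_pos hm, Finset.card_insert_of_notMem (by simp)]
      push_cast
      ring

-- the distinct occupied coordinates inside the range, as a Finset
theorem occupied_toFinset (lo hi : Int) (ps : List Int) :
    (PySem.Set.ofList (ps.filter (fun p => decide (lo ≤ p) && decide (p < hi)))).toFinset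
      = (Finset.Ico lo hi).filter (fun x => x ∈ ps) := by
  ext x
  simp [PySem.Set.mem_ofList, List.mem_filter, Finset.mem_Ico]
  tauto

theorem occupied_length (lo hi : Int) (ps : List Int) :
    (PySem.Set.ofList (ps.filter (fun p => decide (lo ≤ p) && decide (p < hi)))).length
      = ((Finset.Ico lo hi).filter (fun x => x ∈ ps)).card := by
  rw [← occupied_toFinset]
  exact (List.toFinset_card_of_nodup (PySem.Set.nodup_ofList _)).symm

theorem count_empty_space_spec : Claim_equal_count_empty_space := by
  intro a b ps e _
  unfold Spec_count_empty_space count_empty_space count_empty_space_alt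
  dsimp only
  set lo := min a b with hlo
  set hi := max a b with hhi
  rw [ceLoopA_eq hi ps e (hi - lo).toNat lo 0 rfl, occupied_length]
  have hle : lo ≤ hi := by omega
  have hcard : (((Finset.Ico lo hi).filter (fun x => x ∈ ps)).card : Int)
      + (((Finset.Ico lo hi).filter (fun x => x ∉ ps)).card : Int) = hi - lo := by
    have h1 := Finset.card_filter_add_card_filter_not
      (s := Finset.Ico lo hi) (p := fun x => x ∈ ps)
    have h2 : (Finset.Ico lo hi).card = (hi - lo).toNat := Int.card_Ico lo hi
    omega
  have : (((Finset.Ico lo hi).filter (fun x => x ∉ ps)).card : Int)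
      = hi - lo - (((Finset.Ico lo hi).filter (fun x => x ∈ ps)).card : Int) := by omega
  rw [this]
  ring
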